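-- pv_equiv track=rewrite | github.com/chrsztz/APF-Gen | src/export/musicxml.py | pitch_components
-- ===== SOURCE A (Python) =====
-- from typing import List, Tuple, Dict
--
-- def pitch_components(pitch: str) -> Tuple[str, int, int]:
--     step = pitch[0]
--     rest = pitch[1:]
--     alter = 0
--     octave = 4
--     if rest:
--         if "#" in rest:
--             alter += rest.count("#")
--         if "b" in rest:
--             alter -= rest.count("b")
--         digits = "".join([c for c in rest if c.isdigit()])
--         if digits:
--             octave = int(digits)
--     return step, alter, octave
-- ===== SOURCE B (Python) =====
-- def pitch_components(pitch: str):
--     step = pitch[0]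
--     alter = 0
--     digits = ""
--     for c in pitch[1:]:
--         if c == "#":
--             alter += 1
--         elif c == "b":
--             alter -= 1
--         elif c.isdigit():
--             digits += c
--     octave = int(digits) if digits else 4
--     return step, alter, octave
-- ===== Notes on version B (the rewrite author's own statement) =====
-- stated objective: simpler
-- what changed: Replaces the two membership-test/count scans plus the digit comprehension over rest with a single accumulator loop that updates alter and collects digits in one pass.
import Mathlib
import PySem

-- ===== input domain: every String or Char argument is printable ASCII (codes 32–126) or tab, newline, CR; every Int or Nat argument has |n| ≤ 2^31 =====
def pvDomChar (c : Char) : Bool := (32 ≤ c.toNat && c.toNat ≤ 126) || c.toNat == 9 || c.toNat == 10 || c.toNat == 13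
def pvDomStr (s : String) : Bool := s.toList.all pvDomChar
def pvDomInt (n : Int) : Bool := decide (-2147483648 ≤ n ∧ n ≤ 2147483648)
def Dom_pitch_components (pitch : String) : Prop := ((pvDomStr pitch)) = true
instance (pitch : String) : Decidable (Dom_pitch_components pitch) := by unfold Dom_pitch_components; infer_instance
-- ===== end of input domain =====

-- B replaces A's membership/count scans and digit comprehension by one accumulator pass; objective: simpler.

-- ===== PORT A =====
def pitch_components (pitch : String) : String × Int × Int :=
  let cs := pitch.toList
  match PySem.List.pyGet? cs 0 with          -- pitch[0]
  | none => ("", 0, 4)                       -- IndexError on empty pitch; excluded by Pre_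
  | some s =>
    let step := String.mk [s]
    let rest := PySem.List.slice cs (some 1) none   -- pitch[1:]
    let alter : Int := 0
    let octave : Int := 4
    if rest ≠ [] then
      let alter := if PySem.Chars.isIn ['#'] rest then alter + (PySem.Chars.count rest ['#'] : Int) else alter
      let alter := if PySem.Chars.isIn ['b'] rest then alter - (PySem.Chars.count rest ['b'] : Int) else alter
      let digits := rest.filter PySem.Chars.isdigit
      let octave := if digits ≠ [] then (PySem.Int.ofChars? digits).getD octave else octave
      (step, alter, octave)
    else (step, alter, octave)

-- ===== PORT B =====
def pitch_components_alt (pitch : String) : String × Int × Int :=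
  match pitch.toList with
  | [] => ("", 0, 4)                         -- pitch[0] raises IndexError; excluded by Pre_
  | s :: rest =>                             -- s = pitch[0], rest = pitch[1:]
    let st := rest.foldl (fun st c =>
      if c = '#' then (st.1 + 1, st.2)
      else if c = 'b' then (st.1 - 1, st.2)
      else if PySem.Chars.isdigit c then (st.1, st.2 ++ [c])
      else st) ((0 : Int), ([] : List Char))
    let octave : Int := if st.2 ≠ [] then (PySem.Int.ofChars? st.2).getD 4 else 4
    (String.mk [s], st.1, octave)

-- ===== PRECONDITION & SPEC =====
-- Pre_ excludes only the empty string, on which A raises IndexError at pitch[0].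
def Pre_pitch_components (pitch : String) : Prop := pitch ≠ ""
instance (pitch : String) : Decidable (Pre_pitch_components pitch) := by unfold Pre_pitch_components; infer_instance
def pvWitness_pitch_components : String := "C#4"

def Spec_pitch_components (pitch : String) (out : String × Int × Int) : Prop := out = pitch_components_alt pitch
instance (pitch : String) (out : String × Int × Int) : Decidable (Spec_pitch_components pitch out) := by unfold Spec_pitch_components; infer_instance

-- ===== CLAIM (what is proved, stated in full; the proofs are below) =====
def Claim_equal_pitch_components : Prop := ∀ (pitch : String), Dom_pitch_components pitch → Pre_pitch_components pitch → Spec_pitch_components pitch (pitch_components pitch)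

-- ===== LEMMAS AND PROOFS =====

-- The single-char Python substring count is the element count.
theorem countgo_single (c : Char) (l : List Char) (fuel acc : Nat) (h : l.length ≤ fuel) :
    PySem.Chars.count.go [c] fuel l acc = acc + l.count c := by
  induction l generalizing fuel acc with
  | nil => cases fuel <;> simp [PySem.Chars.count.go]
  | cons x t ih =>
    cases fuel with
    | zero => simp at h
    | succ n =>
      simp only [List.length_cons, Nat.succ_le_succ_iff] at h
      by_cases hx : x = c
      · subst hx
        simp [PySem.Chars.count.go, List.isPrefixOf, ih _ _ h, List.count_cons_self]
        omega
      · have hcx : c ≠ x := Ne.symm hx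
        simp [PySem.Chars.count.go, List.isPrefixOf, hx, ih _ _ h, hcx]

theorem count_single (c : Char) (l : List Char) :
    PySem.Chars.count l [c] = l.count c := by
  simp [PySem.Chars.count, countgo_single c l l.length 0 le_rfl]

theorem isIn_single (c : Char) (l : List Char) :
    PySem.Chars.isIn [c] l = true ↔ c ∈ l := by
  rw [PySem.Chars.isIn_iff_infix]
  constructor
  · intro h; exact h.mem (List.mem_singleton_self c)
  · intro h
    obtain ⟨l1, l2, rfl⟩ := List.append_of_mem h
    exact ⟨l1, l2, by simp⟩

-- B's one-pass loop computes the '#'/'b' balance and the digit subsequence.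
theorem foldB (l : List Char) (a : Int) (d : List Char) :
    l.foldl (fun st c =>
      if c = '#' then (st.1 + 1, st.2)
      else if c = 'b' then (st.1 - 1, st.2)
      else if PySem.Chars.isdigit c then (st.1, st.2 ++ [c])
      else st) (a, d)
    = (a + (l.count '#' : Int) - (l.count 'b' : Int), d ++ l.filter PySem.Chars.isdigit) := by
  induction l generalizing a d with
  | nil => simp
  | cons x t ih =>
    simp only [List.foldl_cons]
    by_cases h1 : x = '#'
    · subst h1
      rw [if_pos rfl, ih]
      have hd : PySem.Chars.isdigit '#' = false := by decide
      simp [List.count_cons_self, hd]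
      ring
    · by_cases h2 : x = 'b'
      · subst h2
        rw [if_neg h1, if_pos rfl, ih]
        have hd : PySem.Chars.isdigit 'b' = false := by decide
        simp [List.count_cons_self, hd]
        ring
      · by_cases h3 : PySem.Chars.isdigit x = true
        · rw [if_neg h1, if_neg h2, if_pos h3, ih]
          simp [h1, h2, h3]
        · rw [if_neg h1, if_neg h2, if_neg h3, ih]
          simp [h1, h2, h3]

-- ===== VERDICT (by name: the statement is the Claim_ definition above) =====
theorem pitch_components_spec : Claim_equal_pitch_components := by
  intro pitch _ hpre
  unfold Spec_pitch_components pitch_components pitch_components_alt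
  have hne : pitch.toList ≠ [] := fun hl => hpre (String.toList_eq_nil_iff.mp hl)
  cases hcs : pitch.toList with
  | nil => exact absurd hcs hne
  | cons s t =>
    have hA : PySem.List.pyGet? (s :: t) 0 = some s := by
      simp [PySem.List.pyGet?, PySem.List.pyIdx?]
    simp only [hA, PySem.List.slice_from_one, List.tail_cons, foldB, List.nil_append]
    by_cases ht : t = []
    · subst ht; simp
    · rw [if_pos ht]
      by_cases hsharp : '#' ∈ t
      · by_cases hb : 'b' ∈ t
        · simp only [isIn_single, hsharp, hb, if_pos, count_single]
        · simp [isIn_single, hsharp, hb, count_single, List.count_eq_zero.mpr hb]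
      · have hc0 : t.count '#' = 0 := List.count_eq_zero.mpr hsharp
        by_cases hb : 'b' ∈ t
        · simp [isIn_single, hsharp, hb, count_single, hc0]
        · simp [isIn_single, hsharp, hb, hc0, List.count_eq_zero.mpr hb]
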